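-- pv_equiv track=rewrite | github.com/vacui-dev/synsets | skill/scripts/hermes_disambiguate_v2.py | get_lemma_candidates
-- ===== SOURCE A (Python) =====
-- LEMMA_RULES = [
--     ('ies', 'y'), ('ies', 'ie'), ('ves', 'f'), ('ves', 'fe'),
--     ('ses', 's'), ('ses', 'se'), ('xes', 'x'), ('zes', 'z'),
--     ('ches', 'ch'), ('shes', 'sh'),
--     ('ings', 'ing'), ('ings', ''),
--     ('ing', 'e'), ('ing', ''),
--     ('ness', ''), ('ment', ''), ('tion', 't'), ('tion', 'te'),
--     ('sion', 'd'), ('sion', 'de'), ('ation', 'ate'), ('ation', 'e'),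
--     ('ical', 'ic'), ('ical', ''), ('ably', 'able'), ('ibly', 'ible'),
--     ('ally', 'al'), ('ially', 'ial'), ('ously', 'ous'), ('ively', 'ive'),
--     ('ness', ''), ('ment', ''),
--     ('ful', ''), ('less', ''), ('able', ''), ('ible', ''),
--     ('ity', 'e'), ('ity', ''),
--     ('ly', ''), ('al', ''), ('ous', ''),
--     ('ed', 'e'), ('ed', ''),
--     ('er', 'e'), ('er', ''),
--     ('est', 'e'), ('est', ''),
--     ('es', 'e'), ('es', ''),
--     ('s', ''),
-- ]
--
-- def get_lemma_candidates(word):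
--     """Generate possible base forms of a word using suffix rules."""
--     candidates = {word, word.lower()}
--     w = word.lower()
--     for suffix, replacement in LEMMA_RULES:
--         if w.endswith(suffix) and len(w) > len(suffix) + 1:
--             base = w[:-len(suffix)] + replacement
--             if len(base) >= 2:
--                 candidates.add(base)
--     return candidates
-- ===== SOURCE B (Python) =====
-- # The rule table is kept as one compact "suffix:replacement" spec string and
-- # parsed once into an index mapping each distinct suffix to its (rank,
-- # replacement) list (duplicates kept, in rule order).  The function then
-- # probes that index with the word's own five suffixes w[-L:] instead of
-- # scanning every rule, and applies the gathered rules in rank order.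
-- _RULE_SPEC = (
--     "ies:y ies:ie ves:f ves:fe ses:s ses:se xes:x zes:z ches:ch shes:sh "
--     "ings:ing ings: ing:e ing: ness: ment: tion:t tion:te sion:d sion:de "
--     "ation:ate ation:e ical:ic ical: ably:able ibly:ible ally:al ially:ial "
--     "ously:ous ively:ive ness: ment: ful: less: able: ible: ity:e ity: "
--     "ly: al: ous: ed:e ed: er:e er: est:e est: es:e es: s:"
-- )
--
-- _INDEX = {}
-- for _rank, _entry in enumerate(_RULE_SPEC.split()):
--     _parts = _entry.split(':')
--     _INDEX.setdefault(_parts[0], []).append((_rank, _parts[1]))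
--
--
-- def get_lemma_candidates(word):
--     """Generate possible base forms of a word using suffix rules."""
--     low = word.lower()
--     hits = []
--     for size in range(1, 6):          # rule suffixes are 1..5 chars long
--         if len(low) > size + 1:
--             stem = low[:-size]
--             for rank, rep in _INDEX.get(low[-size:], []):
--                 cand = stem + rep
--                 if len(cand) >= 2:
--                     hits.append((rank, cand))
--     hits.sort(key=lambda h: h[0])     # restore original rule order
--     out = {word, low}
--     for _, cand in hits:
--         out.add(cand)
--     return out
-- ===== Notes on version B (the rewrite author's own statement) =====
-- stated objective: alternative
-- what changed: Instead of scanning all 50 (suffix, replacement) rules and testing endswith on each, B keeps the rule table as a compact spec string parsed once into a suffix->(rank, replacement) index, probes it with the word's own five suffixes w[-L:] for L=1..5, and applies the gathered rules in rank order.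
import Mathlib
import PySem

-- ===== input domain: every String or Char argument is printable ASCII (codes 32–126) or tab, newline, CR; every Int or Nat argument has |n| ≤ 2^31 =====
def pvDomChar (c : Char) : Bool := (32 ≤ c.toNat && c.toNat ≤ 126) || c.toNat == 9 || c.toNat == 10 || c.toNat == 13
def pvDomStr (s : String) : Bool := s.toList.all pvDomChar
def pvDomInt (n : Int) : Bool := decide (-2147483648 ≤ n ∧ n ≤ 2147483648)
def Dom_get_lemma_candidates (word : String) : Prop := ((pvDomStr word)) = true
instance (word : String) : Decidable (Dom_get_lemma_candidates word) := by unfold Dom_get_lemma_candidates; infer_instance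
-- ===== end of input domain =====

-- B replaces A's scan of the 50-rule list by a suffix→(rank, replacement) index parsed
-- once from a compact spec string and probed with the word's own five suffixes.

-- ===== PORT A =====
def LEMMA_RULES : List (String × String) := [
    ("ies", "y"), ("ies", "ie"), ("ves", "f"), ("ves", "fe"),
    ("ses", "s"), ("ses", "se"), ("xes", "x"), ("zes", "z"),
    ("ches", "ch"), ("shes", "sh"),
    ("ings", "ing"), ("ings", ""),
    ("ing", "e"), ("ing", ""),
    ("ness", ""), ("ment", ""), ("tion", "t"), ("tion", "te"),
    ("sion", "d"), ("sion", "de"), ("ation", "ate"), ("ation", "e"),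
    ("ical", "ic"), ("ical", ""), ("ably", "able"), ("ibly", "ible"),
    ("ally", "al"), ("ially", "ial"), ("ously", "ous"), ("ively", "ive"),
    ("ness", ""), ("ment", ""),
    ("ful", ""), ("less", ""), ("able", ""), ("ible", ""),
    ("ity", "e"), ("ity", ""),
    ("ly", ""), ("al", ""), ("ous", ""),
    ("ed", "e"), ("ed", ""),
    ("er", "e"), ("er", ""),
    ("est", "e"), ("est", ""),
    ("es", "e"), ("es", ""),
    ("s", "")]

def get_lemma_candidates (word : String) : List String :=
  let candidates : PySem.Set String :=
    PySem.Set.add (PySem.Set.add PySem.Set.empty word) (PySem.Str.lower word)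
  let w := PySem.Str.lower word
  LEMMA_RULES.foldl (fun candidates r =>
    if PySem.Str.endswith w r.1 = true ∧ PySem.Str.len w > PySem.Str.len r.1 + 1 then
      let base := PySem.Str.slice w none (some (-(PySem.Str.len r.1))) ++ r.2
      if PySem.Str.len base ≥ 2 then PySem.Set.add candidates base else candidates
    else candidates) candidates

-- ===== PORT B =====
def RULE_SPEC : String :=
  "ies:y ies:ie ves:f ves:fe ses:s ses:se xes:x zes:z ches:ch shes:sh ings:ing ings: ing:e ing: ness: ment: tion:t tion:te sion:d sion:de ation:ate ation:e ical:ic ical: ably:able ibly:ible ally:al ially:ial ously:ous ively:ive ness: ment: ful: less: able: ible: ity:e ity: ly: al: ous: ed:e ed: er:e er: est:e est: es:e es: s:"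

-- _entry.split(':') is Str.split? (some, since ":" ≠ ""); _parts[0] / _parts[1] never go out of
-- range on this fixed spec, so pyGetD with "" is exact here; setdefault(k, []).append(v) is
-- Dict.modify k [] (· ++ [v]).
def INDEX : PySem.Dict String (List (Int × String)) :=
  (PySem.List.enumerate (PySem.Str.split₀ RULE_SPEC) 0).foldl
    (fun d e =>
      let parts := (PySem.Str.split? e.2 ":").getD []
      d.modify (PySem.List.pyGetD parts 0 "") []
        (fun l => l ++ [(e.1, PySem.List.pyGetD parts 1 "")]))
    PySem.Dict.empty

def get_lemma_candidates_alt (word : String) : List String :=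
  let low := PySem.Str.lower word
  let hits := (PySem.List.pyRange 1 6 1).foldl (fun hits size =>
    if PySem.Str.len low > size + 1 then
      let stem := PySem.Str.slice low none (some (-size))
      (INDEX.getD (PySem.Str.slice low (some (-size)) none) []).foldl
        (fun hits r =>
          let cand := stem ++ r.2
          if PySem.Str.len cand ≥ 2 then hits ++ [(r.1, cand)] else hits) hits
    else hits) ([] : List (Int × String))
  let sortedHits := PySem.List.sorted hits (fun h => h.1) false
  sortedHits.foldl (fun out h => PySem.Set.add out h.2)
    (PySem.Set.add (PySem.Set.add PySem.Set.empty word) low)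

-- ===== PRECONDITION & SPEC =====
def Spec_get_lemma_candidates (word : String) (out : List String) : Prop := out = get_lemma_candidates_alt word
instance (word : String) (out : List String) : Decidable (Spec_get_lemma_candidates word out) := by unfold Spec_get_lemma_candidates; infer_instance

-- ===== CLAIM (what is proved, stated in full; the proofs are below) =====
def Claim_equal_get_lemma_candidates : Prop := ∀ (word : String), Dom_get_lemma_candidates word → Spec_get_lemma_candidates word (get_lemma_candidates word)

-- ===== LEMMAS AND PROOFS =====

-- proof-side vocabulary
def pvBase (w : String) (r : String × String) : String :=
  PySem.Str.slice w none (some (-(PySem.Str.len r.1))) ++ r.2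

abbrev pvCond (w : String) (r : String × String) : Prop :=
  PySem.Str.endswith w r.1 = true ∧ PySem.Str.len w > PySem.Str.len r.1 + 1 ∧
    PySem.Str.len (pvBase w r) ≥ 2

def pvSeed (word : String) : PySem.Set String :=
  PySem.Set.add (PySem.Set.add PySem.Set.empty word) (PySem.Str.lower word)

def pvEnum : List (Int × (String × String)) := PySem.List.enumerate LEMMA_RULES 0

def pvPair (w : String) (p : Int × (String × String)) : Int × String :=
  (p.1, pvBase w p.2)

def pvBucket (w : String) (L : Int) : List (Int × String) :=
  if PySem.Str.len w > L + 1 then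
    ((INDEX.getD (PySem.Str.slice w (some (-L)) none) []).filter
        (fun p => decide (PySem.Str.len (PySem.Str.slice w none (some (-L)) ++ p.2) ≥ 2))).map
      (fun p => (p.1, PySem.Str.slice w none (some (-L)) ++ p.2))
  else []

def pvR (L : Nat) : List (Int × (String × String)) :=
  pvEnum.filter (fun p => PySem.Str.len p.2.1 == (L : Int))

-- A as seed updated with the bases of the condition-satisfying rules, in rule order
set_option maxHeartbeats 1000000 in
lemma pvA_eq (word : String) :
    get_lemma_candidates word =
      PySem.Set.update (pvSeed word)
        ((LEMMA_RULES.filter (fun r => decide (pvCond (PySem.Str.lower word) r))).map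
          (pvBase (PySem.Str.lower word))) := by
  have hstep : (fun (c : PySem.Set String) (r : String × String) =>
      if PySem.Str.endswith (PySem.Str.lower word) r.1 = true ∧
          PySem.Str.len (PySem.Str.lower word) > PySem.Str.len r.1 + 1 then
        if PySem.Str.len (PySem.Str.slice (PySem.Str.lower word) none
            (some (-(PySem.Str.len r.1))) ++ r.2) ≥ 2 then
          PySem.Set.add c (PySem.Str.slice (PySem.Str.lower word) none
            (some (-(PySem.Str.len r.1))) ++ r.2)
        else c
      else c)
      = (fun (c : PySem.Set String) (r : String × String) =>
          if pvCond (PySem.Str.lower word) r then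
            PySem.Set.add c (pvBase (PySem.Str.lower word) r) else c) := by
    funext c r
    simp only [pvCond, pvBase]
    by_cases h1 : PySem.Str.endswith (PySem.Str.lower word) r.1 = true ∧
        PySem.Str.len (PySem.Str.lower word) > PySem.Str.len r.1 + 1
    · by_cases h2 : PySem.Str.len (PySem.Str.slice (PySem.Str.lower word) none
          (some (-(PySem.Str.len r.1))) ++ r.2) ≥ 2
      · rw [if_pos h1, if_pos h2, if_pos ⟨h1.1, h1.2, h2⟩]
      · rw [if_pos h1, if_neg h2, if_neg (fun hc => h2 hc.2.2)]
    · rw [if_neg h1, if_neg (fun hc => h1 ⟨hc.1, hc.2.1⟩)]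
  unfold get_lemma_candidates
  simp only [hstep]
  rw [PySem.List.foldl_ite_eq_foldl_filter, ← PySem.Set.update_map_eq_foldl_add]
  rfl

-- enumerate commutes with map on the payload
lemma pvEnumerate_map {α β : Type} (f : α → β) (l : List α) (s : Int) :
    PySem.List.enumerate (l.map f) s = (PySem.List.enumerate l s).map (fun p => (p.1, f p.2)) := by
  induction l generalizing s with
  | nil => simp [PySem.List.enumerate_nil]
  | cons x t ih => simp [PySem.List.enumerate_cons, ih]

def pvParse (e : String) : String × String :=
  let parts := (PySem.Str.split? e ":").getD []
  (PySem.List.pyGetD parts 0 "", PySem.List.pyGetD parts 1 "")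

-- parsing the spec string recovers exactly the original rule list
set_option maxRecDepth 40000 in
set_option maxHeartbeats 12000000 in
lemma pvEntries : (PySem.Str.split₀ RULE_SPEC).map pvParse = LEMMA_RULES := by
  decide

-- hence B's index is the grouping fold over the enumerated rule list
lemma pvINDEX_eq :
    INDEX = pvEnum.foldl
      (fun d p => d.modify p.2.1 [] (fun l => l ++ [(p.1, p.2.2)])) PySem.Dict.empty := by
  unfold INDEX pvEnum
  rw [show (fun (d : PySem.Dict String (List (Int × String))) (e : Int × String) =>
      let parts := (PySem.Str.split? e.2 ":").getD []
      d.modify (PySem.List.pyGetD parts 0 "") []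
        (fun l => l ++ [(e.1, PySem.List.pyGetD parts 1 "")]))
    = (fun d e =>
        (fun (d : PySem.Dict String (List (Int × String))) (q : Int × (String × String)) =>
          d.modify q.2.1 [] (fun l => l ++ [(q.1, q.2.2)])) d (e.1, pvParse e.2)) from rfl]
  rw [← List.foldl_map (f := fun e : Int × String => (e.1, pvParse e.2))
      (g := fun (d : PySem.Dict String (List (Int × String))) (q : Int × (String × String)) =>
        d.modify q.2.1 [] (fun l => l ++ [(q.1, q.2.2)]))]
  rw [← pvEnumerate_map, pvEntries]

-- the index retrieves exactly the rules with the looked-up suffix, in rule order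
set_option maxRecDepth 8192 in
lemma pvIndex_getD (k : String) :
    INDEX.getD k [] =
      (pvEnum.filter (fun p => p.2.1 == k)).map (fun p => (p.1, p.2.2)) := by
  rw [pvINDEX_eq]
  unfold pvEnum
  rw [show ((PySem.List.enumerate LEMMA_RULES 0).foldl
      (fun d p => d.modify p.2.1 [] (fun l => l ++ [(p.1, p.2.2)])) PySem.Dict.empty)
      = (((PySem.List.enumerate LEMMA_RULES 0).map
          (fun p => (p.2.1, (p.1, p.2.2)))).foldl
        (fun d q => d.modify q.1 [] (fun l => l ++ [q.2])) PySem.Dict.empty) from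
    (List.foldl_map
      (f := fun p : Int × (String × String) => (p.2.1, (p.1, p.2.2)))
      (g := fun (d : PySem.Dict String (List (Int × String))) q =>
        d.modify q.1 [] (fun l => l ++ [q.2]))).symm]
  rw [PySem.Dict.getD_foldl_modify_append]
  simp [List.filter_map, List.map_map, Function.comp_def, PySem.Dict.getD_empty]

-- one iteration of B's outer loop appends the bucket of that suffix length
lemma pvStep (w : String) (acc : List (Int × String)) (L : Int) :
    (if PySem.Str.len w > L + 1 then
      let stem := PySem.Str.slice w none (some (-L))
      (INDEX.getD (PySem.Str.slice w (some (-L)) none) []).foldl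
        (fun hits r =>
          let cand := stem ++ r.2
          if PySem.Str.len cand ≥ 2 then hits ++ [(r.1, cand)] else hits) acc
    else acc) = acc ++ pvBucket w L := by
  unfold pvBucket
  split
  · show (INDEX.getD (PySem.Str.slice w (some (-L)) none) []).foldl
        (fun hits r =>
          if PySem.Str.len (PySem.Str.slice w none (some (-L)) ++ r.2) ≥ 2 then
            hits ++ [(r.1, PySem.Str.slice w none (some (-L)) ++ r.2)] else hits) acc = _
    rw [PySem.List.foldl_append_ite]
  · simp

-- B's hits list is the concatenation of the five buckets
lemma pvMatches_eq (w : String) :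
    (PySem.List.pyRange 1 6 1).foldl (fun hits size =>
      if PySem.Str.len w > size + 1 then
        let stem := PySem.Str.slice w none (some (-size))
        (INDEX.getD (PySem.Str.slice w (some (-size)) none) []).foldl
          (fun hits r =>
            let cand := stem ++ r.2
            if PySem.Str.len cand ≥ 2 then hits ++ [(r.1, cand)] else hits) hits
      else hits) ([] : List (Int × String))
    = pvBucket w 1 ++ pvBucket w 2 ++ pvBucket w 3 ++ pvBucket w 4 ++ pvBucket w 5 := by
  rw [show PySem.List.pyRange 1 6 1 = [1, 2, 3, 4, 5] from by decide]
  simp only [List.foldl_cons, List.foldl_nil, pvStep, List.nil_append]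

-- the looked-up key w[-L:] names exactly the suffixes of length L that w ends with
lemma pvKey_iff (w : String) (L : Nat) (hL : 0 < L) (hLn : L ≤ w.toList.length)
    (t : String) :
    t = PySem.Str.slice w (some (-(L : Int))) none ↔
      (t.toList.length = L ∧ t.toList <:+ w.toList) := by
  have hkey : (PySem.Str.slice w (some (-(L : Int))) none).toList =
      w.toList.drop (w.toList.length - L) := by
    rw [PySem.Str.toList_slice, PySem.Chars.slice_eq_listSlice,
      PySem.List.slice_from_neg_natCast _ _ hL]
  constructor
  · rintro rfl
    refine ⟨?_, ?_⟩
    · rw [hkey, List.length_drop]; omega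
    · rw [hkey]; exact List.drop_suffix _ _
  · rintro ⟨hlen, hsuf⟩
    rw [← String.toList_inj, hkey, ← hlen]
    exact List.suffix_iff_eq_drop.mp hsuf

-- each bucket is the condition-filter of the rules of that suffix length
lemma pvBucket_char (w : String) (L : Nat) (hL : 1 ≤ L) :
    pvBucket w (L : Int) =
      ((pvR L).filter (fun p => decide (pvCond w p.2))).map (pvPair w) := by
  unfold pvBucket pvR
  rw [List.filter_filter]
  by_cases h : PySem.Str.len w > (L : Int) + 1
  · have hLn : L ≤ w.toList.length := by
      rw [PySem.Str.len_eq] at h; exact_mod_cast le_of_lt (by omega : (L : Int) < w.toList.length)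
    rw [if_pos h, pvIndex_getD, List.filter_map, List.map_map, List.filter_filter]
    rw [List.filter_congr (q := fun p =>
        decide (pvCond w p.2) && (PySem.Str.len p.2.1 == (L : Int))) ?_]
    · apply List.map_congr_left
      intro p hp
      have hlen : PySem.Str.len p.2.1 = (L : Int) := by
        have := (List.mem_filter.mp hp).2
        exact beq_iff_eq.mp (Bool.and_elim_right this)
      show (p.1, _) = pvPair w p
      unfold pvPair pvBase
      rw [hlen]
    · intro p hp
      by_cases hk : p.2.1 = PySem.Str.slice w (some (-(L : Int))) none
      · obtain ⟨hlen, hsuf⟩ := (pvKey_iff w L hL hLn p.2.1).mp hk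
        have hlenI : PySem.Str.len p.2.1 = (L : Int) := by
          rw [PySem.Str.len_eq, hlen]
        have hend : PySem.Str.endswith w p.2.1 = true := by
          rw [PySem.Str.endswith_eq, PySem.Chars.endswith_iff]; exact hsuf
        have hcond : pvCond w p.2 ↔
            PySem.Str.len (PySem.Str.slice w none (some (-(L : Int))) ++ p.2.2) ≥ 2 := by
          unfold pvCond pvBase
          rw [hlenI]
          exact ⟨fun hc => hc.2.2, fun hc => ⟨hend, h, hc⟩⟩
        have e1 : (p.2.1 == PySem.Str.slice w (some (-(L : Int))) none) = true :=
          beq_iff_eq.mpr hk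
        have e2 : (PySem.Str.len p.2.1 == (L : Int)) = true := beq_iff_eq.mpr hlenI
        have e3 : decide (pvCond w p.2) =
            decide (PySem.Str.len (PySem.Str.slice w none (some (-(L : Int))) ++ p.2.2) ≥ 2) :=
          decide_eq_decide.mpr hcond
        simp only [Function.comp_apply, e1, e2, e3, Bool.and_true]
      · have hno : ¬ (PySem.Str.len p.2.1 = (L : Int) ∧ pvCond w p.2) := by
          rintro ⟨hl, hc⟩
          apply hk
          refine (pvKey_iff w L hL hLn p.2.1).mpr ⟨?_, ?_⟩
          · rw [PySem.Str.len_eq] at hl; exact_mod_cast hl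
          · have := hc.1
            rw [PySem.Str.endswith_eq, PySem.Chars.endswith_iff] at this
            exact this
        have hk' : (p.2.1 == PySem.Str.slice w (some (-(L : Int))) none) = false :=
          beq_eq_false_iff_ne.mpr hk
        simp only [Function.comp_apply, hk', Bool.and_false]
        symm
        by_cases hl : PySem.Str.len p.2.1 = (L : Int)
        · have hd : decide (pvCond w p.2) = false :=
            decide_eq_false (fun hc => hno ⟨hl, hc⟩)
          rw [hd, Bool.false_and]
        · rw [beq_eq_false_iff_ne.mpr hl, Bool.and_false]
  · rw [if_neg h]
    symm
    rw [List.map_eq_nil_iff, List.filter_eq_nil_iff]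
    intro p hp hcontra
    have d1 := Bool.and_elim_left hcontra
    have d2 := Bool.and_elim_right hcontra
    have hl : PySem.Str.len p.2.1 = (L : Int) := beq_iff_eq.mp d2
    have := (of_decide_eq_true d1).2.1
    rw [hl] at this
    exact h this

-- the five length-classes together are a permutation of the rule list
lemma pvR_perm : (pvR 1 ++ pvR 2 ++ pvR 3 ++ pvR 4 ++ pvR 5).Perm pvEnum := by
  decide

-- sorting the gathered hits by rank restores exactly rule order
lemma pvSorted_eq (w : String) :
    PySem.List.sorted
        (pvBucket w 1 ++ pvBucket w 2 ++ pvBucket w 3 ++ pvBucket w 4 ++ pvBucket w 5)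
        (fun h => h.1) false
      = (pvEnum.filter (fun p => decide (pvCond w p.2))).map (pvPair w) := by
  have h1 := pvBucket_char w 1 (by norm_num)
  have h2 := pvBucket_char w 2 (by norm_num)
  have h3 := pvBucket_char w 3 (by norm_num)
  have h4 := pvBucket_char w 4 (by norm_num)
  have h5 := pvBucket_char w 5 (by norm_num)
  simp only [Nat.cast_one, Nat.cast_ofNat] at h1 h2 h3 h4 h5
  rw [h1, h2, h3, h4, h5]
  rw [show ∀ (a b c d e : List (Int × String)), a ++ b ++ c ++ d ++ e = a ++ (b ++ (c ++ (d ++ e))) from by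
    intro a b c d e; simp [List.append_assoc]]
  simp only [← List.map_append, ← List.filter_append]
  apply PySem.List.sorted_eq_of_perm_of_pairwise_lt
  · refine List.Perm.map _ (List.Perm.filter _ ?_)
    refine (List.Perm.symm ?_)
    have := pvR_perm
    simpa [List.append_assoc] using this
  · refine List.pairwise_map.mpr ?_
    refine List.Pairwise.filter _ ?_
    exact PySem.List.pairwise_lt_enumerate _ _

lemma pvEnum_filter_map_aux {α γ : Type} (l : List α) (s : Int)
    (P : α → Bool) (g : α → γ) :
    ((PySem.List.enumerate l s).filter (fun p => P p.2)).map (fun p => g p.2)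
      = (l.filter P).map g := by
  induction l generalizing s with
  | nil => simp [PySem.List.enumerate_nil]
  | cons x t ih =>
      rw [PySem.List.enumerate_cons]
      by_cases h : P x = true
      · simp only [List.filter_cons, h]
        simp [ih]
      · simp only [List.filter_cons, h]
        simp only [Bool.false_eq_true, if_false]
        simp [ih]

lemma pvEnum_filter_map (w : String) :
    ((pvEnum.filter (fun p => decide (pvCond w p.2))).map (pvPair w)).map (fun t => t.2)
      = (LEMMA_RULES.filter (fun r => decide (pvCond w r))).map (pvBase w) := by
  rw [List.map_map]
  show ((PySem.List.enumerate LEMMA_RULES 0).filter _).map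
      (fun p => pvBase w p.2) = _
  exact pvEnum_filter_map_aux LEMMA_RULES 0 (fun r => decide (pvCond w r)) (pvBase w)

lemma pvB_eq (word : String) :
    get_lemma_candidates_alt word =
      PySem.Set.update (pvSeed word)
        ((LEMMA_RULES.filter (fun r => decide (pvCond (PySem.Str.lower word) r))).map
          (pvBase (PySem.Str.lower word))) := by
  show (PySem.List.sorted ((PySem.List.pyRange 1 6 1).foldl _ _) _ _).foldl _ (pvSeed word) = _
  rw [pvMatches_eq, pvSorted_eq, ← pvEnum_filter_map (PySem.Str.lower word),
    ← PySem.Set.update_map_eq_foldl_add]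

-- ===== VERDICT (by name: the statement is the Claim_ definition above) =====
theorem get_lemma_candidates_spec : Claim_equal_get_lemma_candidates := by
  intro word _
  unfold Spec_get_lemma_candidates
  rw [pvA_eq, pvB_eq]
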